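-- pv_equiv track=rewrite | github.com/LoganFriedrich/MouseReach | training/diagnose_fp_causes.py | match_reaches
-- ===== SOURCE A (Python) =====
-- def match_reaches(algo_reaches, gt_reaches, tolerance=5):
--     gt_matched = set()
--     algo_matched = set()
--     for ai, ar in enumerate(algo_reaches):
--         apex = ar.get('apex_frame')
--         if apex is None:
--             continue
--         best_gi, best_dist = None, float('inf')
--         for gi, gr in enumerate(gt_reaches):
--             if gi in gt_matched:
--                 continue
--             ga = gr.get('apex_frame')
--             if ga is None:
--                 continue
--             d = abs(apex - ga)
--             if d <= tolerance and d < best_dist: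
--                 best_gi, best_dist = gi, d
--         if best_gi is not None:
--             gt_matched.add(best_gi)
--             algo_matched.add(ai)
--     fp = [r for i, r in enumerate(algo_reaches) if i not in algo_matched]
--     tp = [r for i, r in enumerate(algo_reaches) if i in algo_matched]
--     return tp, fp
-- ===== SOURCE B (Python) =====
-- def match_reaches(algo_reaches, gt_reaches, tolerance=5):
--     # Candidate pool of ground-truth (index, apex) pairs, built once; matched
--     # candidates are physically removed, and tp/fp are emitted in one pass.
--     avail = []
--     for gi, gr in enumerate(gt_reaches):
--         ga = gr.get('apex_frame')
--         if ga is not None: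
--             avail.append((gi, ga))
--     tp, fp = [], []
--     for ar in algo_reaches:
--         apex = ar.get('apex_frame')
--         best = None
--         if apex is not None:
--             best = min(((abs(apex - ga), gi) for gi, ga in avail
--                         if abs(apex - ga) <= tolerance), default=None)
--         if best is None:
--             fp.append(ar)
--         else:
--             avail = [(gi, ga) for gi, ga in avail if gi != best[1]]
--             tp.append(ar)
--     return tp, fp
-- ===== Notes on version B (the rewrite author's own statement) =====
-- stated objective: alternative
-- what changed: Instead of rescanning the full gt_reaches list (with repeated dict lookups and matched-index skip tests) for every algo reach and then re-enumerating algo_reaches twice against the matched-index set, B extracts the (index, apex) candidate pool once, physically removes a candidate when it is matched, and emits tp/fp in a single pass over algo_reaches.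
import Mathlib
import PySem

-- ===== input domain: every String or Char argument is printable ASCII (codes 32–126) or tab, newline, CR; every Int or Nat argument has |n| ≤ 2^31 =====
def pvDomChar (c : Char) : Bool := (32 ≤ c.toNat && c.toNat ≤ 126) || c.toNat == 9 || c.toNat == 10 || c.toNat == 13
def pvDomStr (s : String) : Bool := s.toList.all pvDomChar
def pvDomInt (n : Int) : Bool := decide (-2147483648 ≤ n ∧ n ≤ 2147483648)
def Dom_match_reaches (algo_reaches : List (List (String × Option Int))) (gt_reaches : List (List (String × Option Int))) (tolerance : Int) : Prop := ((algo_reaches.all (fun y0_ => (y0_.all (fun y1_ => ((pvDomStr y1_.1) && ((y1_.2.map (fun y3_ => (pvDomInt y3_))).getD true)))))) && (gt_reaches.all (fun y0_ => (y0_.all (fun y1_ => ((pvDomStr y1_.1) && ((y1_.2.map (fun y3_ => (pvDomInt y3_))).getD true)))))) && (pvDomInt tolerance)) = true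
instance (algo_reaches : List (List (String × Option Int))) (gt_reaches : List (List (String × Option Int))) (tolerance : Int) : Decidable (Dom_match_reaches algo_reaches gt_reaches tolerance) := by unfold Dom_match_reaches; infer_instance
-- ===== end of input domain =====

-- B replaces A's per-algo rescan of ALL gt reaches (repeated dict lookups, matched-index skipping)
-- by a candidate pool of (index, apex) pairs built once and shrunk on every match, emitting tp/fp
-- in a single pass; objective: alternative decomposition, same return value.

-- ===== PORT A =====
-- r.get('apex_frame'): None both when the key is absent and when the stored value is None
def pvApex (r : List (String × Option Int)) : Option Int :=
  ((PySem.Dict.mk r).get? "apex_frame").join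

-- A's inner loop: for gi, gr in enumerate(gt_reaches), state (best_gi, best_dist)
-- (best_dist = none plays float('inf'))
def pvInnerA (apex tolerance : Int) (gtm : PySem.Set Int) :
    List (List (String × Option Int)) → Int → Option Int × Option Int → Option Int × Option Int
  | [], _, best => best
  | gr :: rest, gi, best =>
    let best' :=
      if PySem.Set.contains gtm gi then best
      else
        match pvApex gr with
        | none => best
        | some ga =>
          let d := |apex - ga|
          if decide (d ≤ tolerance) && (match best.2 with
                                        | none => true
                                        | some bd => decide (d < bd)) then (some gi, some d)
          else best
    pvInnerA apex tolerance gtm rest (gi + 1) best'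

-- A's outer loop, state (gt_matched, algo_matched)
def pvOuterA (gt_reaches : List (List (String × Option Int))) (tolerance : Int) :
    List (List (String × Option Int)) → Int → PySem.Set Int → PySem.Set Int →
    PySem.Set Int × PySem.Set Int
  | [], _, gtm, am => (gtm, am)
  | ar :: rest, ai, gtm, am =>
    match pvApex ar with
    | none => pvOuterA gt_reaches tolerance rest (ai + 1) gtm am
    | some apex =>
      match (pvInnerA apex tolerance gtm gt_reaches 0 (none, none)).1 with
      | none => pvOuterA gt_reaches tolerance rest (ai + 1) gtm am
      | some gi =>
        pvOuterA gt_reaches tolerance rest (ai + 1) (PySem.Set.add gtm gi) (PySem.Set.add am ai)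

def match_reaches (algo_reaches : List (List (String × Option Int))) (gt_reaches : List (List (String × Option Int))) (tolerance : Int) : (List (List (String × Option Int))) × (List (List (String × Option Int))) :=
  let am := (pvOuterA gt_reaches tolerance algo_reaches 0 PySem.Set.empty PySem.Set.empty).2
  let fp := ((PySem.List.enumerate algo_reaches 0).filter
              (fun p => !PySem.Set.contains am p.1)).map (·.2)
  let tp := ((PySem.List.enumerate algo_reaches 0).filter
              (fun p => PySem.Set.contains am p.1)).map (·.2)
  (tp, fp)

-- ===== PORT B =====
-- candidate pool: (gi, ga) for gi, gr in enumerate(gt_reaches) if ga is not None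
def pvAvailB (gt_reaches : List (List (String × Option Int))) : List (Int × Int) :=
  (PySem.List.enumerate gt_reaches 0).filterMap
    (fun p => (pvApex p.2).map (fun ga => (p.1, ga)))

-- min(((abs(apex-ga), gi) for gi, ga in avail if abs(apex-ga) <= tolerance), default=None)
def pvBestB (apex tolerance : Int) (avail : List (Int × Int)) : Option (Int × Int) :=
  PySem.List.min2?
    ((avail.filter (fun p => decide (|apex - p.2| ≤ tolerance))).map
      (fun p => (|apex - p.2|, p.1)))
    (fun q => q.1) (fun q => q.2)

def pvLoopB (tolerance : Int) :
    List (List (String × Option Int)) → List (Int × Int) →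
    (List (List (String × Option Int))) × (List (List (String × Option Int)))
  | [], _ => ([], [])
  | ar :: rest, avail =>
    let best := match pvApex ar with
                | none => none
                | some apex => pvBestB apex tolerance avail
    match best with
    | none =>
      let r := pvLoopB tolerance rest avail
      (r.1, ar :: r.2)
    | some q =>
      let r := pvLoopB tolerance rest (avail.filter (fun p => decide (p.1 ≠ q.2)))
      (ar :: r.1, r.2)

def match_reaches_alt (algo_reaches : List (List (String × Option Int))) (gt_reaches : List (List (String × Option Int))) (tolerance : Int) : (List (List (String × Option Int))) × (List (List (String × Option Int))) :=
  pvLoopB tolerance algo_reaches (pvAvailB gt_reaches)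

-- ===== PRECONDITION & SPEC =====
def Spec_match_reaches (algo_reaches : List (List (String × Option Int))) (gt_reaches : List (List (String × Option Int))) (tolerance : Int) (out : (List (List (String × Option Int))) × (List (List (String × Option Int)))) : Prop := out = match_reaches_alt algo_reaches gt_reaches tolerance
instance (algo_reaches : List (List (String × Option Int))) (gt_reaches : List (List (String × Option Int))) (tolerance : Int) (out : (List (List (String × Option Int))) × (List (List (String × Option Int)))) : Decidable (Spec_match_reaches algo_reaches gt_reaches tolerance out) := by unfold Spec_match_reaches; infer_instance

-- ===== CLAIM (what is proved, stated in full; the proofs are below) =====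
def Claim_equal_match_reaches : Prop := ∀ (algo_reaches : List (List (String × Option Int))) (gt_reaches : List (List (String × Option Int))) (tolerance : Int), Dom_match_reaches algo_reaches gt_reaches tolerance → Spec_match_reaches algo_reaches gt_reaches tolerance (match_reaches algo_reaches gt_reaches tolerance)

-- ===== LEMMAS AND PROOFS =====

-- encode B's Option (dist, gi) as A's (best_gi, best_dist) state
def pvEnc : Option (Int × Int) → Option Int × Option Int
  | none => (none, none)
  | some q => (some q.2, some q.1)

-- the fold step hidden inside PySem.List.min2? (on (dist, gi) pairs)
def pvMinStep (acc : Option (Int × Int)) (x : Int × Int) : Option (Int × Int) :=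
  match acc with
  | none => some x
  | some m => if decide (x.1 < m.1) || (!decide (m.1 < x.1) && decide (x.2 < m.2)) then some x
              else some m

lemma min2?_eq_foldl (xs : List (Int × Int)) :
    PySem.List.min2? xs (fun q => q.1) (fun q => q.2) = xs.foldl pvMinStep none := by
  unfold PySem.List.min2?
  congr 1
  funext acc x
  cases acc <;> rfl

lemma contains_eq_decide (S : PySem.Set Int) (x : Int) :
    PySem.Set.contains S x = decide (x ∈ S) := by
  rw [Bool.eq_iff_iff]
  simp

-- the (dist, index) pairs B's min ranges over, for a gt suffix starting at index gi0
def pvPairs (apex tolerance : Int) (S : PySem.Set Int) :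
    List (List (String × Option Int)) → Int → List (Int × Int)
  | [], _ => []
  | g :: gs, gi0 =>
    (match pvApex g with
     | none => []
     | some ga =>
       if !PySem.Set.contains S gi0 && decide (|apex - ga| ≤ tolerance) then [(|apex - ga|, gi0)]
       else []) ++ pvPairs apex tolerance S gs (gi0 + 1)

lemma pairs_eq (apex tolerance : Int) (S : PySem.Set Int) :
    ∀ (gs : List (List (String × Option Int))) (gi0 : Int),
      ((((PySem.List.enumerate gs gi0).filterMap
          (fun p => (pvApex p.2).map (fun ga => (p.1, ga)))).filter
         (fun p => !PySem.Set.contains S p.1)).filter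
        (fun p => decide (|apex - p.2| ≤ tolerance))).map (fun p => (|apex - p.2|, p.1))
      = pvPairs apex tolerance S gs gi0 := by
  intro gs
  induction gs with
  | nil => intro gi0; simp [pvPairs, PySem.List.enumerate]
  | cons g gs ih =>
    intro gi0
    rw [PySem.List.enumerate_cons]
    cases hga : pvApex g with
    | none => simpa [pvPairs, hga, contains_eq_decide] using ih (gi0 + 1)
    | some ga =>
      by_cases hc : gi0 ∈ S
      · simpa [pvPairs, hga, hc, contains_eq_decide] using ih (gi0 + 1)
      · by_cases hd : |apex - ga| ≤ tolerance
        · simpa [pvPairs, hga, hc, hd, contains_eq_decide] using ih (gi0 + 1)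
        · simpa [pvPairs, hga, hc, hd, contains_eq_decide] using ih (gi0 + 1)

lemma bestB_eq (apex tolerance : Int) (S : PySem.Set Int)
    (gt_reaches : List (List (String × Option Int))) :
    pvBestB apex tolerance ((pvAvailB gt_reaches).filter (fun p => !PySem.Set.contains S p.1))
      = (pvPairs apex tolerance S gt_reaches 0).foldl pvMinStep none := by
  unfold pvBestB pvAvailB
  rw [min2?_eq_foldl, pairs_eq]

lemma innerAB (apex tolerance : Int) (S : PySem.Set Int) :
    ∀ (gs : List (List (String × Option Int))) (gi0 : Int) (bo : Option (Int × Int)),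
      (∀ q ∈ bo, q.2 < gi0) →
      pvInnerA apex tolerance S gs gi0 (pvEnc bo) =
        pvEnc ((pvPairs apex tolerance S gs gi0).foldl pvMinStep bo) := by
  intro gs
  induction gs with
  | nil => intro gi0 bo hb; simp [pvInnerA, pvPairs]
  | cons g gs ih =>
    intro gi0 bo hb
    have hb' : ∀ q ∈ bo, q.2 < gi0 + 1 := fun q hq => lt_trans (hb q hq) (by omega)
    cases hga : pvApex g with
    | none =>
      by_cases hc : gi0 ∈ S
      · simpa [pvInnerA, pvPairs, hga, hc, contains_eq_decide] using ih (gi0 + 1) bo hb'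
      · simpa [pvInnerA, pvPairs, hga, hc, contains_eq_decide] using ih (gi0 + 1) bo hb'
    | some ga =>
      by_cases hc : gi0 ∈ S
      · simpa [pvInnerA, pvPairs, hga, hc, contains_eq_decide] using ih (gi0 + 1) bo hb'
      · by_cases hd : |apex - ga| ≤ tolerance
        · cases bo with
          | none =>
            have hb2 : ∀ q ∈ (some (|apex - ga|, gi0) : Option (Int × Int)), q.2 < gi0 + 1 := by
              intro q hq
              rw [Option.mem_def, Option.some_inj] at hq
              subst hq
              show gi0 < gi0 + 1
              omega
            simpa [pvInnerA, pvPairs, pvEnc, pvMinStep, hga, hc, hd, contains_eq_decide]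
              using ih (gi0 + 1) (some (|apex - ga|, gi0)) hb2
          | some m =>
            have hmlt : m.2 < gi0 := hb m (by simp)
            have hgi : ¬ (gi0 < m.2) := by omega
            by_cases hlt : |apex - ga| < m.1
            · have hb2 : ∀ q ∈ (some (|apex - ga|, gi0) : Option (Int × Int)), q.2 < gi0 + 1 := by
                intro q hq
                rw [Option.mem_def, Option.some_inj] at hq
                subst hq
                show gi0 < gi0 + 1
                omega
              simpa [pvInnerA, pvPairs, pvEnc, pvMinStep, hga, hc, hd, hgi, hlt,
                     contains_eq_decide] using ih (gi0 + 1) (some (|apex - ga|, gi0)) hb2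
            · have hb2 : ∀ q ∈ (some m : Option (Int × Int)), q.2 < gi0 + 1 := by
                intro q hq
                rw [Option.mem_def, Option.some_inj] at hq
                subst hq
                omega
              simpa [pvInnerA, pvPairs, pvEnc, pvMinStep, hga, hc, hd, hgi, hlt,
                     contains_eq_decide] using ih (gi0 + 1) (some m) hb2
        · cases bo with
          | none =>
            simpa [pvInnerA, pvPairs, pvEnc, hga, hc, hd, contains_eq_decide]
              using ih (gi0 + 1) none hb'
          | some m =>
            simpa [pvInnerA, pvPairs, pvEnc, hga, hc, hd, contains_eq_decide]
              using ih (gi0 + 1) (some m) hb'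

lemma contains_add (S : PySem.Set Int) (x y : Int) :
    PySem.Set.contains (PySem.Set.add S x) y = (PySem.Set.contains S y || decide (y = x)) := by
  rw [Bool.eq_iff_iff]
  simp [PySem.Set.mem_add]

lemma filter_add (S : PySem.Set Int) (gi : Int) (l : List (Int × Int)) :
    (l.filter (fun p => !PySem.Set.contains S p.1)).filter (fun p => decide (p.1 ≠ gi))
      = l.filter (fun p => !PySem.Set.contains (PySem.Set.add S gi) p.1) := by
  rw [List.filter_filter]
  apply List.filter_congr
  intro p _
  rw [contains_add]
  cases hx : PySem.Set.contains S p.1 <;> by_cases h : p.1 = gi <;> simp [h]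

lemma am_sub (gt_reaches : List (List (String × Option Int))) (tolerance : Int) :
    ∀ (as_ : List (List (String × Option Int))) (ai : Int) (S am : PySem.Set Int) (j : Int),
      j ∈ am → j ∈ (pvOuterA gt_reaches tolerance as_ ai S am).2 := by
  intro as_
  induction as_ with
  | nil => intro ai S am j h; exact h
  | cons ar rest ih =>
    intro ai S am j h
    cases hga : pvApex ar with
    | none => simpa only [pvOuterA, hga] using ih (ai + 1) S am j h
    | some apex =>
      cases hg : (pvInnerA apex tolerance S gt_reaches 0 (none, none)).1 with
      | none => simpa only [pvOuterA, hga, hg] using ih (ai + 1) S am j h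
      | some gi =>
        simp only [pvOuterA, hga, hg]
        exact ih (ai + 1) _ _ j ((PySem.Set.mem_add am ai j).mpr (Or.inl h))

lemma am_new (gt_reaches : List (List (String × Option Int))) (tolerance : Int) :
    ∀ (as_ : List (List (String × Option Int))) (ai : Int) (S am : PySem.Set Int) (j : Int),
      j ∈ (pvOuterA gt_reaches tolerance as_ ai S am).2 → j ∈ am ∨ ai ≤ j := by
  intro as_
  induction as_ with
  | nil => intro ai S am j h; exact Or.inl h
  | cons ar rest ih =>
    intro ai S am j h
    cases hga : pvApex ar with
    | none =>
      rcases ih (ai + 1) S am j (by simpa only [pvOuterA, hga] using h) with h' | h'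
      · exact Or.inl h'
      · exact Or.inr (by omega)
    | some apex =>
      cases hg : (pvInnerA apex tolerance S gt_reaches 0 (none, none)).1 with
      | none =>
        rcases ih (ai + 1) S am j (by simpa only [pvOuterA, hga, hg] using h) with h' | h'
        · exact Or.inl h'
        · exact Or.inr (by omega)
      | some gi =>
        rcases ih (ai + 1) _ _ j (by simpa only [pvOuterA, hga, hg] using h) with h' | h'
        · rcases (PySem.Set.mem_add am ai j).mp h' with h'' | h''
          · exact Or.inl h''
          · exact Or.inr (by omega)
        · exact Or.inr (by omega)

lemma outerAB (gt_reaches : List (List (String × Option Int))) (tolerance : Int) :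
    ∀ (as_ : List (List (String × Option Int))) (ai : Int) (S am : PySem.Set Int),
      (∀ j ∈ am, j < ai) →
      pvLoopB tolerance as_
          ((pvAvailB gt_reaches).filter (fun p => !PySem.Set.contains S p.1)) =
        ((((PySem.List.enumerate as_ ai).filter
            (fun p => PySem.Set.contains (pvOuterA gt_reaches tolerance as_ ai S am).2 p.1)).map (·.2)),
         (((PySem.List.enumerate as_ ai).filter
            (fun p => !PySem.Set.contains (pvOuterA gt_reaches tolerance as_ ai S am).2 p.1)).map (·.2))) := by
  intro as_
  induction as_ with
  | nil => intro ai S am ham; simp [pvLoopB, pvOuterA, PySem.List.enumerate]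
  | cons ar rest ih =>
    intro ai S am ham
    rw [PySem.List.enumerate_cons]
    cases hga : pvApex ar with
    | none =>
      have hrec : pvOuterA gt_reaches tolerance (ar :: rest) ai S am
          = pvOuterA gt_reaches tolerance rest (ai + 1) S am := by
        simp only [pvOuterA, hga]
      rw [hrec]
      have hnm : ai ∉ (pvOuterA gt_reaches tolerance rest (ai + 1) S am).2 := by
        intro hmem
        rcases am_new gt_reaches tolerance rest (ai + 1) S am ai hmem with h | h
        · exact absurd (ham ai h) (lt_irrefl ai)
        · omega
      have hrest := ih (ai + 1) S am (fun j hj => lt_trans (ham j hj) (by omega))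
      simp only [contains_eq_decide] at hrest
      simp [pvLoopB, hga, hrest, hnm]
    | some apex =>
      have hbest := bestB_eq apex tolerance S gt_reaches
      have hinner := innerAB apex tolerance S gt_reaches 0 none (by simp)
      cases hm : (pvPairs apex tolerance S gt_reaches 0).foldl pvMinStep none with
      | none =>
        have hA1 : (pvInnerA apex tolerance S gt_reaches 0 (none, none)).1 = none := by
          have he : ((none, none) : Option Int × Option Int) = pvEnc none := rfl
          rw [he, hinner, hm]; rfl
        have hrec : pvOuterA gt_reaches tolerance (ar :: rest) ai S am
            = pvOuterA gt_reaches tolerance rest (ai + 1) S am := by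
          simp only [pvOuterA, hga, hA1]
        rw [hrec]
        have hnm : ai ∉ (pvOuterA gt_reaches tolerance rest (ai + 1) S am).2 := by
          intro hmem
          rcases am_new gt_reaches tolerance rest (ai + 1) S am ai hmem with h | h
          · exact absurd (ham ai h) (lt_irrefl ai)
          · omega
        have hrest := ih (ai + 1) S am (fun j hj => lt_trans (ham j hj) (by omega))
        simp only [contains_eq_decide] at hrest hbest
        simp [pvLoopB, hga, hbest, hm, hrest, hnm]
      | some q =>
        have hA1 : (pvInnerA apex tolerance S gt_reaches 0 (none, none)).1 = some q.2 := by
          have he : ((none, none) : Option Int × Option Int) = pvEnc none := rfl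
          rw [he, hinner, hm]; rfl
        have hrec : pvOuterA gt_reaches tolerance (ar :: rest) ai S am
            = pvOuterA gt_reaches tolerance rest (ai + 1) (PySem.Set.add S q.2)
                (PySem.Set.add am ai) := by
          simp only [pvOuterA, hga, hA1]
        rw [hrec]
        have hmem : ai ∈ (pvOuterA gt_reaches tolerance rest (ai + 1) (PySem.Set.add S q.2)
            (PySem.Set.add am ai)).2 :=
          am_sub gt_reaches tolerance rest (ai + 1) _ _ ai
            ((PySem.Set.mem_add am ai ai).mpr (Or.inr rfl))
        have ham' : ∀ j ∈ PySem.Set.add am ai, j < ai + 1 := by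
          intro j hj
          rcases (PySem.Set.mem_add am ai j).mp hj with h | h
          · have := ham j h; omega
          · omega
        have hrest := ih (ai + 1) (PySem.Set.add S q.2) (PySem.Set.add am ai) ham'
        have hstep : pvLoopB tolerance (ar :: rest)
              ((pvAvailB gt_reaches).filter (fun p => !PySem.Set.contains S p.1))
            = (ar :: (pvLoopB tolerance rest ((pvAvailB gt_reaches).filter
                  (fun p => !PySem.Set.contains (PySem.Set.add S q.2) p.1))).1,
               (pvLoopB tolerance rest ((pvAvailB gt_reaches).filter
                  (fun p => !PySem.Set.contains (PySem.Set.add S q.2) p.1))).2) := by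
          simp only [pvLoopB, hga, hbest, hm]
          rw [filter_add]
        rw [hstep, hrest]
        simp [hmem]

-- ===== VERDICT (by name: the statement is the Claim_ definition above) =====
theorem match_reaches_spec : Claim_equal_match_reaches := by
  intro algo gt tol _
  unfold Spec_match_reaches match_reaches match_reaches_alt
  have h0 : (pvAvailB gt).filter (fun p => !PySem.Set.contains PySem.Set.empty p.1)
      = pvAvailB gt := by
    simp [PySem.Set.empty]
  have h := outerAB gt tol algo 0 PySem.Set.empty PySem.Set.empty
      (by intro j hj; simp [PySem.Set.empty] at hj)
  rw [h0] at h
  simp only [h]
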